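-- pv_equiv track=rewrite | github.com/zerngit/VHACK2026_T-Junction_GodEye | core/mesa_drone_rescue_mcp.py | pos_to_sector_id
-- ===== SOURCE A (Python) =====
-- from typing import Any, Dict, List, Optional, Tuple, cast
--
-- SECTOR_DEFS: Dict[int, Dict[str, Any]] = {
--     1: {"name": "Sector 1 (NW)", "origin": (0, 8),  "size": (8, 8)},
--     2: {"name": "Sector 2 (N)",  "origin": (8, 8),  "size": (8, 8)},
--     3: {"name": "Sector 3 (NE)", "origin": (16, 8), "size": (8, 8)},
--     4: {"name": "Sector 4 (SW)", "origin": (0, 0),  "size": (8, 8)},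
--     5: {"name": "Sector 5 (S)",  "origin": (8, 0),  "size": (8, 8)},
--     6: {"name": "Sector 6 (SE)", "origin": (16, 0), "size": (8, 8)},
-- }
--
-- def pos_to_sector_id(x: int, y: int):
--     for sid, s in SECTOR_DEFS.items():
--         origin: Tuple[int, int] = s["origin"]
--         ox, oy = origin
--         size: Tuple[int, int] = s["size"]
--         w, h = size
--         if ox <= x < ox + w and oy <= y < oy + h:
--             return sid
--     return None
-- ===== SOURCE B (Python) =====
-- def pos_to_sector_id(x: int, y: int):
--     if not (0 <= x < 24 and 0 <= y < 16):
--         return None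
--     col = x // 8
--     return col + 1 if y >= 8 else col + 4
-- ===== Notes on version B (the rewrite author's own statement) =====
-- stated objective: simpler
-- what changed: Replaces the scan over SECTOR_DEFS containment boxes with a bounds guard plus closed-form row/column arithmetic (col = x // 8, row band from y >= 8).
import Mathlib
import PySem

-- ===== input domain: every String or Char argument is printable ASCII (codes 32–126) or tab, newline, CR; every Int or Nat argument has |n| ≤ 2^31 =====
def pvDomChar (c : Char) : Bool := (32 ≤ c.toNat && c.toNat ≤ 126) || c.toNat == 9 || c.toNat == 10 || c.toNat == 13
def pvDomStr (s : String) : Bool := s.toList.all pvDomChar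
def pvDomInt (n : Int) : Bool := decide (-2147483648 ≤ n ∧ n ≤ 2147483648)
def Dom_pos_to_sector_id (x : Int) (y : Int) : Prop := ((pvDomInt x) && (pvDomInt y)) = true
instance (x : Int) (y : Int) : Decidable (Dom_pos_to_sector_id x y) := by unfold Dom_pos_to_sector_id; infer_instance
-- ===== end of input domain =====

-- B: bounds guard plus closed-form row/column arithmetic instead of scanning SECTOR_DEFS (objective: simpler).
-- ===== PORT A =====
-- SECTOR_DEFS as its items list: (sid, origin, size)
def sectorDefs : List (Int × (Int × Int) × (Int × Int)) :=
  [(1, (0, 8), (8, 8)), (2, (8, 8), (8, 8)), (3, (16, 8), (8, 8)),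
   (4, (0, 0), (8, 8)), (5, (8, 0), (8, 8)), (6, (16, 0), (8, 8))]

-- the for-loop with early return over SECTOR_DEFS.items()
def sectorScan (x y : Int) : List (Int × (Int × Int) × (Int × Int)) → Option Int
  | [] => none
  | (sid, (ox, oy), (w, h)) :: rest =>
    if ox ≤ x ∧ x < ox + w ∧ oy ≤ y ∧ y < oy + h then some sid
    else sectorScan x y rest

def pos_to_sector_id (x : Int) (y : Int) : Option Int :=
  sectorScan x y sectorDefs

-- ===== PORT B =====
def pos_to_sector_id_alt (x : Int) (y : Int) : Option Int :=
  if ¬ (0 ≤ x ∧ x < 24 ∧ 0 ≤ y ∧ y < 16) then none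
  else
    let col := PySem.Int.floordiv x 8
    if y ≥ 8 then some (col + 1) else some (col + 4)

-- ===== PRECONDITION & SPEC =====
def Spec_pos_to_sector_id (x : Int) (y : Int) (out : Option Int) : Prop := out = pos_to_sector_id_alt x y
instance (x : Int) (y : Int) (out : Option Int) : Decidable (Spec_pos_to_sector_id x y out) := by unfold Spec_pos_to_sector_id; infer_instance

-- ===== CLAIM (what is proved, stated in full; the proofs are below) =====
def Claim_equal_pos_to_sector_id : Prop := ∀ (x : Int) (y : Int), Dom_pos_to_sector_id x y → Spec_pos_to_sector_id x y (pos_to_sector_id x y)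

-- ===== LEMMAS AND PROOFS =====

-- ===== VERDICT (by name: the statement is the Claim_ definition above) =====
theorem pos_to_sector_id_spec : Claim_equal_pos_to_sector_id := by
  intro x y _
  unfold Spec_pos_to_sector_id
  simp only [pos_to_sector_id, pos_to_sector_id_alt, sectorScan, sectorDefs,
    PySem.Int.floordiv_eq_ediv_of_pos (b := 8) (by norm_num)]
  split_ifs <;> first
    | rfl
    | (simp only [Option.some.injEq]; omega)
    | (exfalso; omega)
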